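-- pv_equiv track=rewrite | github.com/navneetgupta-source/GoPrac | ai-feedback-video2/ai-feedback-video2/backend/scripts/calculate_choreography.py | _find_phrase_window
-- ===== SOURCE A (Python) =====
-- from typing import Dict, List, Any, Tuple, Optional
--
-- def _find_phrase_window(
--     tokens: List[str],
--     phrase_tokens: List[str],
--     start_token_idx: int = 0,
--     max_gap: int = 4,
-- ) -> Optional[Tuple[int, int]]:
--     if not phrase_tokens:
--         return None
--     n = len(tokens)
--     m = len(phrase_tokens)
--     i = start_token_idx
--     while i < n:
--         if tokens[i] != phrase_tokens[0]:
--             i += 1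
--             continue
--         j = 0
--         k = i
--         last_match = i
--         start_match = None
--         while k < n and j < m:
--             if tokens[k] == phrase_tokens[j]:
--                 if start_match is None:
--                     start_match = k
--                 last_match = k
--                 j += 1
--             elif start_match is not None and (k - last_match) > max_gap:
--                 break
--             k += 1
--         if j == m and start_match is not None:
--             return start_match, last_match
--         i += 1
--     return None
-- ===== SOURCE B (Python) =====
-- from typing import List, Optional, Tuple
--
-- def _first_greater(a, x):
--     # least element of the ascending list a that is strictly greater than x, else None
--     lo, hi = 0, len(a)
--     while lo < hi:
--         mid = (lo + hi) // 2
--         if a[mid] <= x: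
--             lo = mid + 1
--         else:
--             hi = mid
--     return a[lo] if lo < len(a) else None
--
-- def _find_phrase_window(
--     tokens: List[str],
--     phrase_tokens: List[str],
--     start_token_idx: int = 0,
--     max_gap: int = 4,
-- ) -> Optional[Tuple[int, int]]:
--     if not phrase_tokens:
--         return None
--     n = len(tokens)
--     # the scan window A walks, as a plain list; position p <-> token index start_token_idx + p
--     view = [tokens[i] for i in range(start_token_idx, n)]
--     # one pass: ascending positions of every token value in the window
--     pos = {}
--     for p, v in enumerate(view):
--         pos.setdefault(v, []).append(p)
--     step = max(max_gap, 0) + 1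
--     rest = phrase_tokens[1:]
--     for s in pos.get(phrase_tokens[0], []):
--         last = s
--         for t in rest:
--             nxt = _first_greater(pos.get(t, []), last)
--             if nxt is None or nxt > last + step:
--                 break
--             last = nxt
--         else:
--             return start_token_idx + s, start_token_idx + last
--     return None
-- ===== Notes on version B (the rewrite author's own statement) =====
-- stated objective: alternative
-- what changed: B normalizes the scan range into one window list, precomputes per-token ascending occurrence positions, and replaces A's stateful token-by-token rescans (gap-abort state machine per candidate) with a greedy first-occurrence-after-last chain bounded by max(max_gap,0)+1.
import Mathlib
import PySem

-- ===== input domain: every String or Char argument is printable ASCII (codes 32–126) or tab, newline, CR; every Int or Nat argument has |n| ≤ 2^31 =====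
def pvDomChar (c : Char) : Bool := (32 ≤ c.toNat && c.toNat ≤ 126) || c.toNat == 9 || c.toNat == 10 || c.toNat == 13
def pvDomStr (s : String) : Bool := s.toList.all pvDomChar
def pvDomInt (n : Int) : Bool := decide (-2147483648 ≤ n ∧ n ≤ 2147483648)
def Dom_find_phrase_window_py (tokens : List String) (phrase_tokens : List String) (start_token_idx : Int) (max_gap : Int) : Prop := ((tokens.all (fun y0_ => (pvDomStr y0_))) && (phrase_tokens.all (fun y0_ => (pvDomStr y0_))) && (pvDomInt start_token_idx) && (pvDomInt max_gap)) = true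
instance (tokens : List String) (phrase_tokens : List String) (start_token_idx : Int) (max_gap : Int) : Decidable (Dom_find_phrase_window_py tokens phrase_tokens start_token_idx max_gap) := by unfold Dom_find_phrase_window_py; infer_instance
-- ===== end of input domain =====

-- B replaces A's nested index-scanning while loops by a normalized scan window, per-token
-- occurrence positions and a first-occurrence-after-last greedy chain (objective: alternative).

-- ===== PORT A =====
-- inner while loop of A: state (k, j, last_match, start_match); returns (j, last_match, start_match)
def innerA (tokens phrase_tokens : List String) (n m max_gap : Int)
    (k j last_match : Int) (start_match : Option Int) : Int × Int × Option Int :=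
  if _h : k < n ∧ j < m then
    if PySem.List.pyGet? tokens k = PySem.List.pyGet? phrase_tokens j then
      innerA tokens phrase_tokens n m max_gap (k + 1) (j + 1) k
        (if start_match = none then some k else start_match)
    else if start_match ≠ none ∧ max_gap < k - last_match then
      (j, last_match, start_match)
    else
      innerA tokens phrase_tokens n m max_gap (k + 1) j last_match start_match
  else (j, last_match, start_match)
termination_by (n - k).toNat
decreasing_by all_goals omega

-- outer while loop of A
def outerA (tokens phrase_tokens : List String) (n m max_gap i : Int) : Option (Int × Int) :=
  if _h : i < n then
    if PySem.List.pyGet? tokens i ≠ PySem.List.pyGet? phrase_tokens 0 then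
      outerA tokens phrase_tokens n m max_gap (i + 1)
    else
      match innerA tokens phrase_tokens n m max_gap i 0 i none with
      | (j, last_match, start_match) =>
        if j = m ∧ start_match ≠ none then some (start_match.getD 0, last_match)
        else outerA tokens phrase_tokens n m max_gap (i + 1)
  else none
termination_by (n - i).toNat
decreasing_by all_goals omega

def find_phrase_window_py (tokens : List String) (phrase_tokens : List String) (start_token_idx : Int) (max_gap : Int) : Option (Int × Int) :=
  if phrase_tokens = [] then none
  else outerA tokens phrase_tokens (tokens.length : Int) (phrase_tokens.length : Int) max_gap start_token_idx

-- ===== PORT B =====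
-- _first_greater(a, x): binary search for the least element of ascending a strictly above x
def firstGreaterB (a : List Int) (x : Int) (lo hi : Nat) : Option Int :=
  if _h : lo < hi then
    let mid := (lo + hi) / 2
    if a.getD mid 0 ≤ x then firstGreaterB a x (mid + 1) hi
    else firstGreaterB a x lo mid
  else if lo < a.length then some (a.getD lo 0) else none
termination_by hi - lo
decreasing_by all_goals omega

-- view = [tokens[i] for i in range(start_token_idx, n)]  (the scan window, normalized)
def viewB (tokens : List String) (start n : Int) : List String :=
  (PySem.List.pyRange start n 1).map (fun i => (PySem.List.pyGet? tokens i).getD "")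

-- pos = {}; for p, v in enumerate(view): pos.setdefault(v, []).append(p)
def posDictB (view : List String) : PySem.Dict String (List Int) :=
  (PySem.List.enumerate view 0).foldl (fun d pv => d.modify pv.2 [] (· ++ [pv.1])) PySem.Dict.empty

-- the inner for-loop over the remaining phrase tokens: next = first occurrence after last
def chainB (pos : PySem.Dict String (List Int)) (step : Int) (rest : List String) (last : Int) : Option Int :=
  match rest with
  | [] => some last
  | t :: ts =>
    match firstGreaterB (pos.getD t []) last 0 (pos.getD t []).length with
    | none => none
    | some nxt => if last + step < nxt then none else chainB pos step ts nxt

-- the outer for-loop over candidate start positions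
def tryCandsB (pos : PySem.Dict String (List Int)) (step : Int) (rest : List String) (start : Int) : List Int → Option (Int × Int)
  | [] => none
  | s :: ss =>
    match chainB pos step rest s with
    | some last => some (start + s, start + last)
    | none => tryCandsB pos step rest start ss

def find_phrase_window_py_alt (tokens : List String) (phrase_tokens : List String) (start_token_idx : Int) (max_gap : Int) : Option (Int × Int) :=
  match phrase_tokens with
  | [] => none
  | t0 :: rest =>
    let view := viewB tokens start_token_idx (tokens.length : Int)
    let pos := posDictB view
    tryCandsB pos (max max_gap 0 + 1) rest start_token_idx (pos.getD t0 [])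

-- ===== PRECONDITION & SPEC =====
-- Pre_ excludes exactly the inputs where A raises IndexError: a nonempty phrase with
-- start_token_idx below -len(tokens) (tokens[i] out of range); B raises there too.
def Pre_find_phrase_window_py (tokens : List String) (phrase_tokens : List String) (start_token_idx : Int) (max_gap : Int) : Prop :=
  phrase_tokens = [] ∨ -(tokens.length : Int) ≤ start_token_idx
instance (tokens : List String) (phrase_tokens : List String) (start_token_idx : Int) (max_gap : Int) : Decidable (Pre_find_phrase_window_py tokens phrase_tokens start_token_idx max_gap) := by unfold Pre_find_phrase_window_py; infer_instance

def pvWitness_find_phrase_window_py : List String × List String × Int × Int := (["a", "b", "a"], ["a", "a"], 0, 4)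

def Spec_find_phrase_window_py (tokens : List String) (phrase_tokens : List String) (start_token_idx : Int) (max_gap : Int) (out : Option (Int × Int)) : Prop := out = find_phrase_window_py_alt tokens phrase_tokens start_token_idx max_gap
instance (tokens : List String) (phrase_tokens : List String) (start_token_idx : Int) (max_gap : Int) (out : Option (Int × Int)) : Decidable (Spec_find_phrase_window_py tokens phrase_tokens start_token_idx max_gap out) := by unfold Spec_find_phrase_window_py; infer_instance

-- ===== CLAIM (what is proved, stated in full; the proofs are below) =====
def Claim_equal_find_phrase_window_py : Prop := ∀ (tokens : List String) (phrase_tokens : List String) (start_token_idx : Int) (max_gap : Int), Dom_find_phrase_window_py tokens phrase_tokens start_token_idx max_gap → Pre_find_phrase_window_py tokens phrase_tokens start_token_idx max_gap → Spec_find_phrase_window_py tokens phrase_tokens start_token_idx max_gap (find_phrase_window_py tokens phrase_tokens start_token_idx max_gap)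

-- ===== LEMMAS AND PROOFS =====

-- reference (proof-side) forms of B's loops, over the window and occurrence lists directly
def occsB (view : List String) (t : String) : List Int :=
  ((PySem.List.enumerate view 0).filter (fun pv => pv.2 == t)).map (fun pv => pv.1)

def chainRef (view : List String) (step : Int) (rest : List String) (last : Int) : Option Int :=
  match rest with
  | [] => some last
  | t :: ts =>
    match (occsB view t).find? (fun p => decide (last < p)) with
    | none => none
    | some nxt => if last + step < nxt then none else chainRef view step ts nxt

def tryCandsRef (view : List String) (step : Int) (rest : List String) (start : Int) : List Int → Option (Int × Int)
  | [] => none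
  | s :: ss =>
    match chainRef view step rest s with
    | some last => some (start + s, start + last)
    | none => tryCandsRef view step rest start ss


-- the token A reads at raw index i (defined for -len ≤ i < len)
-- the positions dict built by B is exactly the occurrence lists
theorem posDict_getD (view : List String) (t : String) :
    (posDictB view).getD t [] = occsB view t := by
  have h1 : posDictB view = ((PySem.List.enumerate view 0).map (fun pv => (pv.2, pv.1))).foldl
      (fun d q => d.modify q.1 [] (· ++ [q.2])) PySem.Dict.empty := by
    rw [List.foldl_map]
    rfl
  rw [h1, PySem.Dict.getD_foldl_modify_append]
  rw [List.filter_map, List.map_map]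
  rfl

theorem find?_eq_some_of_first (a : List Int) (pred : Int → Bool) (q : Nat)
    (hq : q < a.length) (hpq : pred a[q] = true)
    (hbefore : ∀ (idx : Nat) (h : idx < a.length), idx < q → pred a[idx] = false) :
    a.find? pred = some a[q] := by
  induction a generalizing q with
  | nil => simp at hq
  | cons x xs ih =>
    cases q with
    | zero =>
      simp only [List.getElem_cons_zero] at hpq ⊢
      rw [List.find?_cons, hpq]
    | succ q' =>
      have hx : pred x = false := hbefore 0 (by omega) (by omega)
      rw [List.find?_cons, hx]
      simp only [List.getElem_cons_succ] at hpq ⊢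
      exact ih q' (by simpa using hq) hpq
        (fun idx h hlt => hbefore (idx + 1) (by simpa using h) (by omega))

theorem firstGreaterB_spec (a : List Int) (x : Int) (hs : a.Pairwise (· < ·)) :
    ∀ (fuel : Nat) (lo hi : Nat), fuel = hi - lo → hi ≤ a.length →
      (∀ (idx : Nat) (h : idx < a.length), idx < lo → a[idx] ≤ x) →
      (∀ (idx : Nat) (h : idx < a.length), hi ≤ idx → x < a[idx]) →
      firstGreaterB a x lo hi = a.find? (fun p => decide (x < p)) := by
  have hmono : ∀ (i j : Nat) (hi : i < a.length) (hj : j < a.length), i < j → a[i] < a[j] :=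
    fun i j hi hj hij => (List.pairwise_iff_getElem.mp hs) i j hi hj hij
  intro fuel
  induction fuel using Nat.strong_induction_on with
  | h fuel ih =>
    intro lo hi hfuel hhilen hlo hhi
    rw [firstGreaterB]
    by_cases hlh : lo < hi
    · rw [dif_pos hlh]
      dsimp only
      have hmidlt : (lo + hi) / 2 < a.length := by omega
      have hget : a.getD ((lo + hi) / 2) 0 = a[(lo + hi) / 2] := List.getD_eq_getElem a 0 hmidlt
      rw [hget]
      by_cases hbr : a[(lo + hi) / 2] ≤ x
      · rw [if_pos hbr]
        apply ih (hi - ((lo + hi) / 2 + 1)) (by omega) ((lo + hi) / 2 + 1) hi rfl hhilen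
        · intro idx h hidx
          rcases Nat.lt_or_ge idx ((lo + hi) / 2) with h1 | h1
          · exact le_of_lt (lt_of_lt_of_le (hmono idx _ h hmidlt h1) hbr)
          · have : idx = (lo + hi) / 2 := by omega
            subst this
            exact hbr
        · exact hhi
      · rw [if_neg hbr]
        push_neg at hbr
        apply ih ((lo + hi) / 2 - lo) (by omega) lo ((lo + hi) / 2) rfl (by omega) hlo
        intro idx h hidx
        rcases Nat.lt_or_ge ((lo + hi) / 2) idx with h1 | h1
        · exact lt_trans hbr (hmono _ idx hmidlt h h1)
        · have : idx = (lo + hi) / 2 := by omega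
          subst this
          exact hbr
    · rw [dif_neg hlh]
      by_cases hlen : lo < a.length
      · rw [if_pos hlen, List.getD_eq_getElem a 0 hlen]
        rw [find?_eq_some_of_first a _ lo hlen (by simp only [decide_eq_true_eq]; exact hhi lo hlen (by omega))
          (fun idx h hlt => by simp only [decide_eq_false_iff_not, not_lt]; exact hlo idx h hlt)]
      · rw [if_neg hlen]
        symm
        apply List.find?_eq_none.mpr
        intro p hp
        obtain ⟨idx, hidx, rfl⟩ := List.mem_iff_getElem.mp hp
        simp only [decide_eq_true_eq, not_lt]
        exact hlo idx hidx (by omega)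

theorem firstGreater_eq_find? (a : List Int) (x : Int) (hs : a.Pairwise (· < ·)) :
    firstGreaterB a x 0 a.length = a.find? (fun p => decide (x < p)) := by
  exact firstGreaterB_spec a x hs a.length 0 a.length (by omega) (le_refl _)
    (fun idx h hlt => by omega) (fun idx h hge => by omega)

def tokA (tokens : List String) (i : Int) : String := (PySem.List.pyGet? tokens i).getD ""

theorem tokA_pyGet? (tokens : List String) (i : Int)
    (h1 : -(tokens.length : Int) ≤ i) (h2 : i < (tokens.length : Int)) :
    PySem.List.pyGet? tokens i = some (tokA tokens i) := by
  have h : PySem.List.pyGet? tokens i ≠ none := by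
    intro hn
    rw [PySem.List.pyGet?_eq_none_iff] at hn
    exact hn ⟨h1, h2⟩
  cases hh : PySem.List.pyGet? tokens i with
  | none => exact absurd hh h
  | some v => simp [tokA, hh]

theorem viewB_length (tokens : List String) (start n : Int) :
    (viewB tokens start n).length = (n - start).toNat := by
  simp [viewB, PySem.List.length_pyRange_one]

theorem viewB_get (tokens : List String) (start n i : Int)
    (hs : start ≤ i) (hi : i < n) :
    (viewB tokens start n)[(i - start).toNat]? = some (tokA tokens i) := by
  have hk : (i - start).toNat < (n - start).toNat := by omega
  simp only [viewB, List.getElem?_map, PySem.List.getElem?_pyRange_one]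
  rw [if_pos hk]
  have h2 : start + max (i - start) 0 = i := by omega
  simp [tokA, h2]

theorem mem_occsB (view : List String) (t : String) (p : Int) :
    p ∈ occsB view t ↔ 0 ≤ p ∧ view[p.toNat]? = some t := by
  simp only [occsB, List.mem_map, List.mem_filter, PySem.List.mem_enumerate_iff]
  constructor
  · rintro ⟨pv, ⟨⟨k, hk, hpv⟩, ht⟩, hp⟩
    subst hpv
    simp only [beq_iff_eq] at ht
    simp only [zero_add] at hp ⊢
    subst hp
    refine ⟨by omega, ?_⟩
    simp only [Int.toNat_natCast]
    rw [List.getElem?_eq_getElem hk, ht]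
  · rintro ⟨hp, hv⟩
    have hk : p.toNat < view.length := (List.getElem?_eq_some_iff.mp hv).1
    refine ⟨((p.toNat : Int), view[p.toNat]), ⟨⟨p.toNat, hk, by simp⟩, ?_⟩, by simp; omega⟩
    simp only [beq_iff_eq]
    exact (List.getElem?_eq_some_iff.mp hv).2

theorem pairwise_occsB (view : List String) (t : String) :
    (occsB view t).Pairwise (· < ·) := by
  apply List.Pairwise.map
  · intro a b h; exact h
  · exact (PySem.List.pairwise_lt_enumerate view 0).filter _

theorem find?_sorted_first (l : List Int) (pred : Int → Bool) (q : Int)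
    (hs : l.Pairwise (· < ·)) (hq : q ∈ l) (hpq : pred q = true)
    (hmin : ∀ p ∈ l, pred p = true → q ≤ p) : l.find? pred = some q := by
  induction l with
  | nil => simp at hq
  | cons x xs ih =>
    rcases List.mem_cons.mp hq with h | h
    · subst h
      simp [hpq]
    · have hxq : x < q := (List.pairwise_cons.mp hs).1 q h
      have hx : pred x = false := by
        by_contra hc
        have := hmin x (List.mem_cons_self) (by simpa using hc)
        omega
      rw [List.find?_cons, hx]
      exact ih (List.pairwise_cons.mp hs).2 h (fun p hp hpp => hmin p (List.mem_cons_of_mem _ hp) hpp)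

theorem find?_occs_none (view : List String) (t : String) (last : Int)
    (h : ∀ p : Nat, last < (p : Int) → view[p]? ≠ some t) :
    (occsB view t).find? (fun p => decide (last < p)) = none := by
  apply List.find?_eq_none.mpr
  intro p hp
  have hm := (mem_occsB view t p).mp hp
  simp only [decide_eq_true_eq] at *
  intro hlt
  exact h p.toNat (by omega) hm.2

theorem find?_occs_some (view : List String) (t : String) (last : Int) (q : Nat)
    (hq : view[q]? = some t) (hlt : last < (q : Int))
    (hfirst : ∀ p : Nat, last < (p : Int) → p < q → view[p]? ≠ some t) :
    (occsB view t).find? (fun p => decide (last < p)) = some (q : Int) := by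
  apply find?_sorted_first _ _ _ (pairwise_occsB view t)
  · exact (mem_occsB view t _).mpr ⟨by omega, by simpa using hq⟩
  · simpa using hlt
  · intro p hp hpp
    simp only [decide_eq_true_eq] at hpp
    have hm := (mem_occsB view t p).mp hp
    by_contra hc
    exact hfirst p.toNat (by omega) (by omega) hm.2

theorem find?_occs_some_inv (view : List String) (t : String) (last nxt : Int)
    (h : (occsB view t).find? (fun p => decide (last < p)) = some nxt) :
    last < nxt ∧ 0 ≤ nxt ∧ view[nxt.toNat]? = some t := by
  have h1 := List.find?_some h
  have h2 := List.mem_of_find?_eq_some h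
  have hm := (mem_occsB view t nxt).mp h2
  simp only [decide_eq_true_eq] at h1
  exact ⟨h1, hm.1, hm.2⟩

-- sorted-list filter lemmas for the candidate list
theorem filter_ge_cons (l : List Int) (q : Int) (hs : l.Pairwise (· < ·)) (hq : q ∈ l) :
    l.filter (fun p => decide (q ≤ p)) = q :: l.filter (fun p => decide (q + 1 ≤ p)) := by
  induction l with
  | nil => simp at hq
  | cons x xs ih =>
    rcases List.mem_cons.mp hq with h | h
    · have hcongr : ∀ p ∈ xs, (decide (q ≤ p) : Bool) = decide (q + 1 ≤ p) := by
        intro p hp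
        have := (List.pairwise_cons.mp hs).1 p hp
        simp only [decide_eq_decide]
        omega
      rw [List.filter_cons, List.filter_cons]
      have h1 : (decide (q ≤ x) : Bool) = true := by simp only [decide_eq_true_eq]; omega
      have h2 : (decide (q + 1 ≤ x) : Bool) = false := by simp only [decide_eq_false_iff_not]; omega
      rw [h1, h2, List.filter_congr hcongr, h]
      simp
    · have hxq : x < q := (List.pairwise_cons.mp hs).1 q h
      rw [List.filter_cons, List.filter_cons]
      have h1 : (decide (q ≤ x) : Bool) = false := by simp only [decide_eq_false_iff_not]; omega
      have h2 : (decide (q + 1 ≤ x) : Bool) = false := by simp only [decide_eq_false_iff_not]; omega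
      rw [h1, h2]
      exact ih (List.pairwise_cons.mp hs).2 h

theorem filter_ge_step (l : List Int) (q : Int) (hq : q ∉ l) :
    l.filter (fun p => decide (q ≤ p)) = l.filter (fun p => decide (q + 1 ≤ p)) := by
  apply List.filter_congr
  intro p hp
  have hne : p ≠ q := fun h => hq (h ▸ hp)
  simp only [decide_eq_decide]
  omega

-- the central scan lemma: A's inner while loop agrees with B's occurrence chain
theorem scan_lemma (tokens phrase : List String) (gap start : Int)
    (hlow : -(tokens.length : Int) ≤ start) :
    ∀ (N : Nat) (k j lastR sm : Int) (ts : List String),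
      N = ((tokens.length : Int) - k).toNat →
      0 ≤ j → j ≤ (phrase.length : Int) → phrase.drop j.toNat = ts →
      start ≤ lastR → lastR < (tokens.length : Int) →
      lastR < k → k ≤ lastR + (max gap 0 + 1) →
      (∀ t' ts', ts = t' :: ts' → ∀ r : Int, lastR < r → r < k → tokA tokens r ≠ t') →
      (∀ lp, chainRef (viewB tokens start (tokens.length : Int)) (max gap 0 + 1) ts (lastR - start) = some lp →
        innerA tokens phrase (tokens.length : Int) (phrase.length : Int) gap k j lastR (some sm)
          = ((phrase.length : Int), start + lp, some sm)) ∧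
      (chainRef (viewB tokens start (tokens.length : Int)) (max gap 0 + 1) ts (lastR - start) = none →
        (innerA tokens phrase (tokens.length : Int) (phrase.length : Int) gap k j lastR (some sm)).1 ≠ (phrase.length : Int)) := by
  intro N
  induction N with
  | zero =>
    intro k j lastR sm ts hN hj0 hjm hdrop hslast hlastn hlk hkstep hno
    have hkn : (tokens.length : Int) ≤ k := by omega
    rw [innerA, dif_neg (by omega)]
    cases ts with
    | nil =>
      have hple : phrase.length ≤ j.toNat := List.drop_eq_nil_iff.mp hdrop
      have hjm' : j = (phrase.length : Int) := by omega
      constructor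
      · intro lp hlp
        simp only [chainRef, Option.some.injEq] at hlp
        subst hlp
        rw [hjm']
        have h2 : start + (lastR - start) = lastR := by omega
        rw [h2]
      · intro hnone
        simp [chainRef] at hnone
    | cons t ts' =>
      have hjlt : j.toNat < phrase.length := by
        by_contra hc
        push_neg at hc
        rw [List.drop_eq_nil_of_le hc] at hdrop
        simp at hdrop
      have hchain : chainRef (viewB tokens start (tokens.length : Int)) (max gap 0 + 1) (t :: ts') (lastR - start) = none := by
        rw [chainRef, find?_occs_none]
        intro p hp hv
        have hplen : p < (viewB tokens start (tokens.length : Int)).length := (List.getElem?_eq_some_iff.mp hv).1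
        rw [viewB_length] at hplen
        have hr1 : start ≤ start + (p : Int) := by omega
        have hr2 : start + (p : Int) < (tokens.length : Int) := by omega
        have hvg := viewB_get tokens start (tokens.length : Int) (start + (p : Int)) hr1 hr2
        have hpt : (start + (p : Int) - start).toNat = p := by omega
        rw [hpt] at hvg
        rw [hvg] at hv
        have := hno t ts' rfl (start + (p : Int)) (by omega) (by omega)
        exact this (by simpa using hv)
      rw [hchain]
      constructor
      · intro lp hlp
        simp at hlp
      · intro _
        simp only []
        omega
  | succ N ih =>
    intro k j lastR sm ts hN hj0 hjm hdrop hslast hlastn hlk hkstep hno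
    have hkn : k < (tokens.length : Int) := by omega
    have hm1 : gap ≤ max gap 0 := le_max_left _ _
    have hm2 : (0 : Int) ≤ max gap 0 := le_max_right _ _
    have hm3 : max gap 0 = gap ∨ max gap 0 = 0 := max_choice _ _
    cases ts with
    | nil =>
      have hple : phrase.length ≤ j.toNat := List.drop_eq_nil_iff.mp hdrop
      have hjm' : j = (phrase.length : Int) := by omega
      rw [innerA, dif_neg (by omega)]
      constructor
      · intro lp hlp
        simp only [chainRef, Option.some.injEq] at hlp
        subst hlp
        rw [hjm']
        have h2 : start + (lastR - start) = lastR := by omega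
        rw [h2]
      · intro hnone
        simp [chainRef] at hnone
    | cons t ts' =>
      obtain ⟨jn, rfl⟩ : ∃ jn : ℕ, j = (jn : Int) := ⟨j.toNat, by omega⟩
      rw [Int.toNat_natCast] at hdrop
      have hjlt : jn < phrase.length := by
        by_contra hc
        push_neg at hc
        rw [List.drop_eq_nil_of_le hc] at hdrop
        simp at hdrop
      have hjm2 : (jn : Int) < (phrase.length : Int) := by omega
      have hpk := tokA_pyGet? tokens k (by omega) (by omega)
      have hpj : PySem.List.pyGet? phrase (jn : Int) = some t := by
        have h0 : (phrase.drop jn)[0]? = some t := by rw [hdrop]; rfl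
        rw [PySem.List.pyGet?_natCast, ← h0]
        simp [List.getElem?_drop]
      rw [innerA, dif_pos ⟨hkn, hjm2⟩, hpk, hpj]
      by_cases heq : tokA tokens k = t
      · rw [if_pos (by rw [heq]), if_neg (by simp)]
        have hq : (viewB tokens start (tokens.length : Int))[(k - start).toNat]? = some t := by
          rw [viewB_get tokens start (tokens.length : Int) k (by omega) hkn, heq]
        have hfind : (occsB (viewB tokens start (tokens.length : Int)) t).find? (fun p => decide (lastR - start < p)) = some (((k - start).toNat : Nat) : Int) := by
          apply find?_occs_some _ _ _ _ hq (by omega)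
          intro p hp1 hp2 hv
          have hr1 : start ≤ start + (p : Int) := by omega
          have hr2 : start + (p : Int) < (tokens.length : Int) := by
            have hplen : p < (viewB tokens start (tokens.length : Int)).length := (List.getElem?_eq_some_iff.mp hv).1
            rw [viewB_length] at hplen
            omega
          have hvg := viewB_get tokens start (tokens.length : Int) (start + (p : Int)) hr1 hr2
          have hpt : (start + (p : Int) - start).toNat = p := by omega
          rw [hpt] at hvg
          rw [hvg] at hv
          exact hno t ts' rfl (start + (p : Int)) (by omega) (by omega) (by simpa using hv)
        have hcast : (((k - start).toNat : Nat) : Int) = k - start := by omega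
        rw [hcast] at hfind
        rw [chainRef, hfind]
        dsimp only
        rw [if_neg (by omega)]
        have hdrop1 : phrase.drop (jn + 1) = ts' := by
          have h1 := congrArg (List.drop 1) hdrop
          simpa [List.drop_drop, Nat.add_comm] using h1
        have hdrop' : phrase.drop ((jn : Int) + 1).toNat = ts' := by
          rw [show ((jn : Int) + 1).toNat = jn + 1 by omega]
          exact hdrop1
        have := ih (k + 1) ((jn : Int) + 1) k sm ts' (by omega) (by omega) (by omega) hdrop' (by omega) hkn (by omega) (by omega)
          (by intro t' ts'' _ r hr1 hr2; omega)
        exact this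
      · rw [if_neg (by simp only [Option.some.injEq]; exact heq)]
        by_cases hbreak : gap < k - lastR
        · rw [if_pos ⟨by simp, hbreak⟩]
          have hchain : chainRef (viewB tokens start (tokens.length : Int)) (max gap 0 + 1) (t :: ts') (lastR - start) = none := by
            rw [chainRef]
            cases hf : (occsB (viewB tokens start (tokens.length : Int)) t).find? (fun p => decide (lastR - start < p)) with
            | none => rfl
            | some nxt =>
              obtain ⟨h1, h2, h3⟩ := find?_occs_some_inv _ _ _ _ hf
              have hplen : nxt.toNat < (viewB tokens start (tokens.length : Int)).length := (List.getElem?_eq_some_iff.mp h3).1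
              rw [viewB_length] at hplen
              have hr1 : start ≤ start + nxt := by omega
              have hr2 : start + nxt < (tokens.length : Int) := by omega
              have hvg := viewB_get tokens start (tokens.length : Int) (start + nxt) hr1 hr2
              have hpt : (start + nxt - start).toNat = nxt.toNat := by omega
              rw [hpt] at hvg
              rw [hvg] at h3
              have htok : tokA tokens (start + nxt) = t := by simpa using h3
              have hrge : k < start + nxt := by
                by_contra hc
                push_neg at hc
                rcases lt_or_eq_of_le hc with hlt | heq2
                · exact hno t ts' rfl (start + nxt) (by omega) hlt htok
                · rw [← heq2] at heq
                  exact heq htok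
              dsimp only
              rw [if_pos (by omega)]
          rw [hchain]
          refine ⟨fun lp hlp => by simp at hlp, fun _ => ?_⟩
          simp only []
          omega
        · rw [if_neg (by intro hc; exact hbreak hc.2)]
          apply ih (k + 1) ((jn : Int)) lastR sm (t :: ts') (by omega) hj0 hjm (by rw [Int.toNat_natCast]; exact hdrop) hslast hlastn (by omega) (by omega)
          intro t' ts'' hts r hr1 hr2
          rcases eq_or_lt_of_le (show r ≤ k by omega) with heq2 | hlt
          · cases hts
            rw [heq2]
            exact heq
          · exact hno t' ts'' hts r hr1 (by omega)

-- A's outer loop agrees with B's candidate iteration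
theorem outer_lemma (tokens : List String) (t0 : String) (rest : List String) (gap start : Int)
    (hlow : -(tokens.length : Int) ≤ start) :
    ∀ (N : Nat) (i : Int), N = ((tokens.length : Int) - i).toNat → start ≤ i →
      outerA tokens (t0 :: rest) (tokens.length : Int) ((t0 :: rest).length : Int) gap i
        = tryCandsRef (viewB tokens start (tokens.length : Int)) (max gap 0 + 1) rest start
            ((occsB (viewB tokens start (tokens.length : Int)) t0).filter (fun p => decide (i - start ≤ p))) := by
  intro N
  induction N with
  | zero =>
    intro i hN hsi
    rw [outerA, dif_neg (by omega)]
    have hfe : (occsB (viewB tokens start (tokens.length : Int)) t0).filter (fun p => decide (i - start ≤ p)) = [] := by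
      rw [List.filter_eq_nil_iff]
      intro p hp
      have hm := (mem_occsB _ _ _).mp hp
      have hplen : p.toNat < (viewB tokens start (tokens.length : Int)).length := (List.getElem?_eq_some_iff.mp hm.2).1
      rw [viewB_length] at hplen
      simp only [decide_eq_true_eq]
      omega
    rw [hfe]
    rfl
  | succ N ih =>
    intro i hN hsi
    have hin : i < (tokens.length : Int) := by omega
    have hpk := tokA_pyGet? tokens i (by omega) hin
    have hp0 : PySem.List.pyGet? (t0 :: rest) 0 = some t0 := PySem.List.pyGet?_zero_cons t0 rest
    rw [outerA, dif_pos hin, hpk, hp0]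
    by_cases heq : tokA tokens i = t0
    · rw [if_neg (by simp only [ne_eq, Option.some.injEq, not_not]; exact heq)]
      have hvi : (viewB tokens start (tokens.length : Int))[(i - start).toNat]? = some t0 := by
        rw [viewB_get tokens start (tokens.length : Int) i hsi hin, heq]
      have hmem : i - start ∈ occsB (viewB tokens start (tokens.length : Int)) t0 :=
        (mem_occsB _ _ _).mpr ⟨by omega, hvi⟩
      have hcons := filter_ge_cons _ (i - start) (pairwise_occsB _ _) hmem
      rw [hcons, tryCandsRef]
      rw [innerA, dif_pos ⟨hin, by simp only [List.length_cons]; omega⟩, hpk, hp0,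
        if_pos (by rw [heq]), if_pos rfl]
      simp only [zero_add]
      have hs := scan_lemma tokens (t0 :: rest) gap start hlow (((tokens.length : Int) - (i + 1)).toNat)
        (i + 1) 1 i i rest rfl (by omega) (by simp only [List.length_cons]; omega) (by rfl)
        hsi hin (by omega) (by omega) (by intro t' ts' _ r h1 h2; omega)
      cases hc : chainRef (viewB tokens start (tokens.length : Int)) (max gap 0 + 1) rest (i - start) with
      | some lp =>
        have h1 := hs.1 lp hc
        rw [h1]
        dsimp only
        rw [if_pos ⟨rfl, by simp⟩]
        have h2 : start + (i - start) = i := by omega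
        simp only [Option.getD_some, h2]
      | none =>
        have h2 := hs.2 hc
        rcases hri : innerA tokens (t0 :: rest) (tokens.length : Int) ((t0 :: rest).length : Int) gap (i + 1) 1 i (some i) with ⟨j', l', sm'⟩
        rw [hri] at h2
        dsimp only
        rw [if_neg (by intro hcon; exact h2 hcon.1)]
        have hih := ih (i + 1) (by omega) (by omega)
        rw [show (fun p => decide (i + 1 - start ≤ p)) = (fun p => decide (i - start + 1 ≤ p)) from by
          funext p; rw [decide_eq_decide]; omega] at hih
        exact hih
    · rw [if_pos (by simp only [ne_eq, Option.some.injEq]; exact heq)]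
      have hnm : i - start ∉ occsB (viewB tokens start (tokens.length : Int)) t0 := by
        intro hmem
        have hm := (mem_occsB _ _ _).mp hmem
        rw [viewB_get tokens start (tokens.length : Int) i hsi hin] at hm
        exact heq (by simpa using hm.2)
      rw [filter_ge_step _ _ hnm]
      have hih := ih (i + 1) (by omega) (by omega)
      rw [show (fun p => decide (i + 1 - start ≤ p)) = (fun p => decide (i - start + 1 ≤ p)) from by
        funext p; rw [decide_eq_decide]; omega] at hih
      exact hih

theorem chainB_eq (view : List String) (step : Int) (rest : List String) :
    ∀ last, chainB (posDictB view) step rest last = chainRef view step rest last := by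
  induction rest with
  | nil => intro last; rfl
  | cons t ts ih =>
    intro last
    rw [chainB, chainRef, posDict_getD, firstGreater_eq_find? _ _ (pairwise_occsB view t)]
    cases (occsB view t).find? (fun p => decide (last < p)) with
    | none => rfl
    | some nxt =>
      dsimp only
      by_cases h : last + step < nxt
      · rw [if_pos h, if_pos h]
      · rw [if_neg h, if_neg h, ih nxt]

theorem tryCands_eq (view : List String) (step : Int) (rest : List String) (start : Int) :
    ∀ cands, tryCandsB (posDictB view) step rest start cands = tryCandsRef view step rest start cands := by
  intro cands
  induction cands with
  | nil => rfl
  | cons s ss ih =>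
    rw [tryCandsB, tryCandsRef, chainB_eq]
    cases chainRef view step rest s with
    | none => exact ih
    | some last => rfl

-- ===== VERDICT (by name: the statement is the Claim_ definition above) =====
theorem find_phrase_window_py_spec : Claim_equal_find_phrase_window_py := by
  unfold Claim_equal_find_phrase_window_py
  intro tokens phrase_tokens start_token_idx max_gap _hdom hpre
  unfold Spec_find_phrase_window_py
  cases phrase_tokens with
  | nil => rfl
  | cons t0 rest =>
    have hlow : -(tokens.length : Int) ≤ start_token_idx := by
      rcases hpre with h | h
      · exact absurd h (by simp)
      · exact h
    rw [find_phrase_window_py, if_neg (by simp)]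
    have halt : find_phrase_window_py_alt tokens (t0 :: rest) start_token_idx max_gap =
        tryCandsB (posDictB (viewB tokens start_token_idx (tokens.length : Int))) (max max_gap 0 + 1) rest start_token_idx
          ((posDictB (viewB tokens start_token_idx (tokens.length : Int))).getD t0 []) := rfl
    rw [halt, tryCands_eq, posDict_getD]
    rw [outer_lemma tokens t0 rest max_gap start_token_idx hlow
      (((tokens.length : Int) - start_token_idx).toNat) start_token_idx rfl (le_refl _)]
    congr 1
    apply List.filter_eq_self.mpr
    intro p hp
    have hm := (mem_occsB _ _ _).mp hp
    simp only [decide_eq_true_eq]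
    omega
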